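-- pv_equiv track=rewrite | github.com/mujahidina/codility-1 | codility.py | solution
-- ===== SOURCE A (Python) =====
-- def solution(A, D):
--     # Initialize balance and fees
--     balance = 0
--     fees = 5
--     # Dictionary to keep track of cards by month
--     cards = {}
--
--     # Iterate through transactions
--     for amount, date in zip(A, D):
--         # Extract month from date
--         month = int(date.split('-')[1])
--         # If amount is positive, add it to balance
--         if amount >= 0:
--             balance += amount
--         else:
--             # If amount is negative, add it to balance and track it in cards dictionary
--             balance += amount
--             if month in cards:
--                 cards[month].append(amount)
--             else:
--                 cards[month] = [amount]
--
--     # Iterate through each month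
--     for month in range(1, 13):
--         # Check if there are at least 3 transactions in the month and total amount is greater than or equal to -100
--         if month in cards and len(cards[month]) >= 3 and sum(cards[month]) >= -100:
--             # If conditions met, apply fees for transactions beyond the first 3
--             balance += fees * (len(cards[month]) - 3)
--         else:
--             # If conditions not met, apply fees for the month
--             balance -= fees
--
--     return balance
-- ===== SOURCE B (Python) =====
-- def solution(A, D):
--     # Month of each paired transaction (parsed once, up front).
--     months = [int(d.split('-')[1]) for _, d in zip(A, D)]
--     # Every transaction, positive or negative, goes into the balance.
--     balance = sum(a for a, _ in zip(A, D))
--     # For each calendar month, rescan the transactions for that month's negatives.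
--     for m in range(1, 13):
--         neg = [a for a, mm in zip(A, months) if a < 0 and mm == m]
--         if len(neg) >= 3 and sum(neg) >= -100:
--             balance += 5 * (len(neg) - 3)
--         else:
--             balance -= 5
--     return balance
-- ===== Notes on version B (the rewrite author's own statement) =====
-- stated objective: alternative
-- what changed: B drops A's month dictionary entirely: it parses all months up front, sums the paired amounts in one pass, and then for each calendar month 1..12 rescans the transactions to collect that month's negatives and apply the fee rule to the filtered list (12 filtered rescans instead of one grouping pass; trades a constant-factor rescan for no dictionary).
import Mathlib
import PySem

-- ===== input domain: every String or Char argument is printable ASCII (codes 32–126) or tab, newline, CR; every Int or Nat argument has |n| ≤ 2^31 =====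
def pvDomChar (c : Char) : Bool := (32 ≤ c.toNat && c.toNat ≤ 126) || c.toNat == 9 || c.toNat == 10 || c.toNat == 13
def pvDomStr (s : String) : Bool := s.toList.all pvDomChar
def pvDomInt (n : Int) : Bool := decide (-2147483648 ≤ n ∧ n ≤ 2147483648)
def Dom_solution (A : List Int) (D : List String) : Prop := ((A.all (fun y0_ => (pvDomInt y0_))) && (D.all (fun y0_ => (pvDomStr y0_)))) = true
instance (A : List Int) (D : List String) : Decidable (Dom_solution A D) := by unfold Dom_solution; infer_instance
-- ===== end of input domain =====

-- B drops A's month dictionary: it sums the paired amounts once and then, for each month 1..12,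
-- rescans the transactions filtering that month's negatives (objective: alternative).

-- int(date.split('-')[1]) : none exactly where Python raises (IndexError / ValueError)
def parseMonth (d : String) : Option Int :=
  match PySem.Str.split? d "-" with
  | some parts => (PySem.List.pyGet? parts 1).bind PySem.Int.ofStr?
  | none => none

-- ===== PORT A =====
def solutionStep (st : Int × PySem.Dict Int (List Int)) (p : Int × String) :
    Int × PySem.Dict Int (List Int) :=
  let month := (parseMonth p.2).getD 0   -- Pre_ guarantees the parse succeeds
  if p.1 ≥ 0 then (st.1 + p.1, st.2)
  else
    if st.2.contains month then (st.1 + p.1, st.2.modify month [] (fun l => l ++ [p.1]))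
    else (st.1 + p.1, st.2.insert month [p.1])

def solutionFee (cards : PySem.Dict Int (List Int)) (bal : Int) (m : Int) : Int :=
  match cards.get? m with
  | some l => if (l.length : Int) ≥ 3 ∧ l.sum ≥ -100 then bal + 5 * ((l.length : Int) - 3)
              else bal - 5
  | none => bal - 5

def solution (A : List Int) (D : List String) : Int :=
  let st := (A.zip D).foldl solutionStep (0, PySem.Dict.empty)
  (PySem.List.pyRange 1 13).foldl (solutionFee st.2) st.1

-- ===== PORT B =====
def solutionAltFee (A : List Int) (months : List Int) (bal : Int) (m : Int) : Int :=
  let neg := ((A.zip months).filter (fun q => decide (q.1 < 0) && (q.2 == m))).map Prod.fst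
  if (neg.length : Int) ≥ 3 ∧ neg.sum ≥ -100 then bal + 5 * ((neg.length : Int) - 3)
  else bal - 5

def solution_alt (A : List Int) (D : List String) : Int :=
  let months := (A.zip D).map (fun p => (parseMonth p.2).getD 0)  -- Pre_: parse succeeds
  let balance := ((A.zip D).map Prod.fst).sum
  (PySem.List.pyRange 1 13).foldl (solutionAltFee A months) balance

-- ===== PRECONDITION & SPEC =====
-- Pre_ excludes exactly the inputs where Python A raises: some paired date whose
-- second '-'-field is missing or not an int literal (IndexError / ValueError); B raises there too.
def Pre_solution (A : List Int) (D : List String) : Prop :=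
  ∀ p ∈ A.zip D, (parseMonth p.2).isSome = true
instance (A : List Int) (D : List String) : Decidable (Pre_solution A D) := by
  unfold Pre_solution; infer_instance

def pvWitness_solution : List Int × List String := ([5, -10], ["2024-01-02", "2024-01-03"])

def Spec_solution (A : List Int) (D : List String) (out : Int) : Prop := out = solution_alt A D
instance (A : List Int) (D : List String) (out : Int) : Decidable (Spec_solution A D out) := by
  unfold Spec_solution; infer_instance

-- ===== CLAIM (what is proved, stated in full; the proofs are below) =====
def Claim_equal_solution : Prop := ∀ (A : List Int) (D : List String), Dom_solution A D →
  Pre_solution A D → Spec_solution A D (solution A D)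

-- ===== LEMMAS AND PROOFS =====

-- A's dictionary-building step, separated from its balance accumulation (proof helper)
def cardStep (d : PySem.Dict Int (List Int)) (p : Int × String) : PySem.Dict Int (List Int) :=
  if p.1 ≥ 0 then d
  else if d.contains ((parseMonth p.2).getD 0) then
    d.modify ((parseMonth p.2).getD 0) [] (fun l => l ++ [p.1])
  else d.insert ((parseMonth p.2).getD 0) [p.1]

-- fee contribution of one month, as a function of that month's list of negatives
def feeOf (l : List Int) : Int :=
  if (l.length : Int) ≥ 3 ∧ l.sum ≥ -100 then 5 * ((l.length : Int) - 3) else -5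

def negPred (m : Int) (p : Int × String) : Bool :=
  decide (p.1 < 0) && ((parseMonth p.2).getD 0 == m)

lemma foldA (L : List (Int × String)) : ∀ (b : Int) (d : PySem.Dict Int (List Int)),
    L.foldl solutionStep (b, d) = (b + (L.map Prod.fst).sum, L.foldl cardStep d) := by
  induction L with
  | nil => intro b d; simp
  | cons p t ih =>
    intro b d
    rw [List.foldl_cons, List.foldl_cons]
    have hstep : solutionStep (b, d) p = (b + p.1, cardStep d p) := by
      unfold solutionStep cardStep
      by_cases h : p.1 ≥ 0
      · simp [h]
      · simp only [h, if_false]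
        split <;> rfl
    rw [hstep, ih]
    simp [add_assoc]

-- the grouped list for month m is exactly the filtered list, no Nodup needed
lemma getD_cardStep (d : PySem.Dict Int (List Int)) (p : Int × String) (m : Int) :
    (cardStep d p).getD m [] = d.getD m [] ++ (if negPred m p then [p.1] else []) := by
  unfold cardStep negPred
  set m0 := (parseMonth p.2).getD 0 with hm0
  by_cases hpos : p.1 ≥ 0
  · have : decide (p.1 < 0) = false := by simp; omega
    simp [hpos, this]
  · have hneg : decide (p.1 < 0) = true := by simp; omega
    simp only [hpos, if_false, hneg, Bool.true_and]
    by_cases hc : d.contains m0 = true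
    · rw [if_pos hc, PySem.Dict.getD_modify]
      by_cases he : m = m0
      · simp [he]
      · have : (m0 == m) = false := by simp [Ne.symm he]
        simp [he, this]
    · rw [if_neg hc, PySem.Dict.getD_insert]
      by_cases he : m = m0
      · subst he
        rw [PySem.Dict.getD_of_not_contains _ _ (by simpa using hc)]
        simp
      · have : (m0 == m) = false := by simp [Ne.symm he]
        simp [he, this]

lemma getD_cardFold (L : List (Int × String)) : ∀ (d : PySem.Dict Int (List Int)) (m : Int),
    (L.foldl cardStep d).getD m [] = d.getD m [] ++ (L.filter (negPred m)).map Prod.fst := by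
  induction L with
  | nil => intro d m; simp
  | cons p t ih =>
    intro d m
    rw [List.foldl_cons, ih, getD_cardStep]
    by_cases h : negPred m p = true <;> simp [h]

lemma fee_eq_getD (cards : PySem.Dict Int (List Int)) (bal m : Int) :
    solutionFee cards bal m = bal + feeOf (cards.getD m []) := by
  unfold solutionFee feeOf
  rw [PySem.Dict.getD_eq_get?_getD]
  rcases h : cards.get? m with _ | l
  · simp only [Option.getD_none, List.length_nil, List.sum_nil]
    rw [if_neg (by norm_num)]
    omega
  · simp only [Option.getD_some]
    by_cases hc : (l.length : Int) ≥ 3 ∧ l.sum ≥ -100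
    · rw [if_pos hc, if_pos hc]
    · rw [if_neg hc, if_neg hc]; omega

-- B's filtered list over (A, months) equals the filter over the original pairs
lemma zip_months (A : List Int) : ∀ (D : List String),
    A.zip ((A.zip D).map (fun p => (parseMonth p.2).getD 0))
      = (A.zip D).map (fun p => (p.1, (parseMonth p.2).getD 0)) := by
  induction A with
  | nil => intro D; simp
  | cons a t ih =>
    intro D
    cases D with
    | nil => simp
    | cons d ds => simp [ih ds]

lemma altFee_eq (A : List Int) (D : List String) (bal m : Int) :
    solutionAltFee A ((A.zip D).map (fun p => (parseMonth p.2).getD 0)) bal m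
      = bal + feeOf (((A.zip D).filter (negPred m)).map Prod.fst) := by
  unfold solutionAltFee feeOf
  rw [zip_months]
  have hf : ((A.zip D).map (fun p => (p.1, (parseMonth p.2).getD 0))).filter
        (fun q => decide (q.1 < 0) && (q.2 == m))
      = ((A.zip D).filter (negPred m)).map (fun p => (p.1, (parseMonth p.2).getD 0)) := by
    rw [List.filter_map]
    rfl
  rw [hf, List.map_map]
  have : (Prod.fst ∘ fun p : Int × String => (p.1, (parseMonth p.2).getD 0)) = Prod.fst := rfl
  rw [this]
  set l := ((A.zip D).filter (negPred m)).map Prod.fst with hl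
  by_cases hc : (l.length : Int) ≥ 3 ∧ l.sum ≥ -100
  · rw [if_pos hc, if_pos hc]
  · rw [if_neg hc, if_neg hc]; omega

-- ===== VERDICT (by name: the statement is the Claim_ definition above) =====
theorem solution_spec : Claim_equal_solution := by
  intro A D _ _
  unfold Spec_solution solution solution_alt
  dsimp only
  rw [foldA]
  dsimp only
  have hA : solutionFee (((A.zip D).foldl cardStep PySem.Dict.empty))
      = fun bal m => bal + feeOf (((A.zip D).filter (negPred m)).map Prod.fst) := by
    funext bal m
    rw [fee_eq_getD, getD_cardFold]
    simp [PySem.Dict.getD_empty]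
  have hB : solutionAltFee A ((A.zip D).map (fun p => (parseMonth p.2).getD 0))
      = fun bal m => bal + feeOf (((A.zip D).filter (negPred m)).map Prod.fst) := by
    funext bal m
    exact altFee_eq A D bal m
  rw [hA, hB, PySem.List.foldl_add, PySem.List.foldl_add]
  ring
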